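-- pv_equiv track=rewrite | github.com/YasirNacak/Coursework | cse321_algorithm_design/assignment_3/program.py | q2_rec
-- ===== SOURCE A (Python) =====
-- import math
--
-- def q2_rec(coin_list, start_index, end_index):
--     size = len(coin_list)
--     right_offset = 0
--
--     # if there are odd number of coins in the pile
--     if size % 2 == 1:
--         right_offset = 1
--
--     half_size = math.floor(size / 2)
--     left_pile = coin_list[0 : half_size]
--     right_pile = coin_list[half_size : size - right_offset]
--
--     diff = end_index - start_index + 1
--
--     if sum(left_pile) == sum(right_pile):
--         if size == 1:
--             return start_index
--         elif size % 2 == 1: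
--             return end_index
--     elif sum(left_pile) < sum(right_pile):
--         # Fake coin is in the left pile
--         return q2_rec(left_pile, start_index, start_index + diff // 2 - 1)
--     elif sum(right_pile) < sum(left_pile):
--         # Fake coin is in the right pile
--         return q2_rec(right_pile, start_index + diff // 2, end_index - right_offset)
-- ===== SOURCE B (Python) =====
-- def q2_rec(coin_list, start_index, end_index):
--     # One prefix-sum pass, then an index-window loop: no slice copies, no recursion.
--     prefix = [0]
--     total = 0
--     for c in coin_list:
--         total += c
--         prefix.append(total)
--     lo, hi = 0, len(coin_list)
--     while True:
--         size = hi - lo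
--         right_offset = 1 if size % 2 == 1 else 0
--         half = size // 2
--         left_sum = prefix[lo + half] - prefix[lo]
--         right_sum = prefix[hi - right_offset] - prefix[lo + half]
--         diff = end_index - start_index + 1
--         if left_sum == right_sum:
--             if size == 1:
--                 return start_index
--             if size % 2 == 1:
--                 return end_index
--             return None
--         if left_sum < right_sum:
--             hi = lo + half
--             end_index = start_index + diff // 2 - 1
--         else:
--             lo, hi = lo + half, hi - right_offset
--             start_index = start_index + diff // 2
--             end_index = end_index - right_offset
-- ===== Notes on version B (the rewrite author's own statement) =====
-- stated objective: alternative
-- what changed: Recursion with slice copies replaced by a single prefix-sum pass plus an iterative index-window loop; half sums become two prefix-array subtractions instead of slicing and re-summing each level.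
import Mathlib
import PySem

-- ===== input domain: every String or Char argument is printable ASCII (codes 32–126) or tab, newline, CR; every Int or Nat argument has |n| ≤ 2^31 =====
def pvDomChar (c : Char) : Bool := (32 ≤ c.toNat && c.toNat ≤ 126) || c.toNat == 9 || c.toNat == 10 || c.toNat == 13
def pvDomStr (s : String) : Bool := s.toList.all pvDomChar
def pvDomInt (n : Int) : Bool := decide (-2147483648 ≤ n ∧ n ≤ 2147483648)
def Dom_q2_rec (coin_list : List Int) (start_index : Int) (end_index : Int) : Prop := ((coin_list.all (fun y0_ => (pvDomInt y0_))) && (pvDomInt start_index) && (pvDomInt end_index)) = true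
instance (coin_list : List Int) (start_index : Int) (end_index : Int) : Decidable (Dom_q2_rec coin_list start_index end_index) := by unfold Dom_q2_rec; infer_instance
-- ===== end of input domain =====

-- B replaces A's slice-and-recur balance search by one prefix-sum pass and an
-- iterative index-window loop (objective: alternative; return value proved equal).

-- ===== PORT A =====
def q2_rec (coin_list : List Int) (start_index : Int) (end_index : Int) : Option Int :=
  let size : Int := (coin_list.length : Int)
  let right_offset : Int := if PySem.Int.mod size 2 = 1 then 1 else 0
  let half_size : Int := PySem.Int.floordiv size 2
  let left_pile := PySem.List.slice coin_list (some 0) (some half_size)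
  let right_pile := PySem.List.slice coin_list (some half_size) (some (size - right_offset))
  let diff : Int := end_index - start_index + 1
  if h1 : left_pile.sum = right_pile.sum then
    if size = 1 then some start_index
    else if PySem.Int.mod size 2 = 1 then some end_index
    else none
  else if h2 : left_pile.sum < right_pile.sum then
    q2_rec left_pile start_index (start_index + PySem.Int.floordiv diff 2 - 1)
  else
    q2_rec right_pile (start_index + PySem.Int.floordiv diff 2) (end_index - right_offset)
termination_by coin_list.length
decreasing_by
  · rcases coin_list with _ | ⟨x, xs⟩
    · exact absurd (by decide) h1
    · rw [show PySem.Int.floordiv (((x::xs).length : Nat) : Int) 2 = (((x::xs).length / 2 : Nat) : Int) from by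
        exact_mod_cast PySem.Int.floordiv_natCast _ 2]
      rw [PySem.List.slice_zero_start, PySem.List.slice_to_natCast]
      simp; omega
  · rcases coin_list with _ | ⟨x, xs⟩
    · exact absurd (by decide) h1
    · rw [show PySem.Int.floordiv (((x::xs).length : Nat) : Int) 2 = (((x::xs).length / 2 : Nat) : Int) from by
        exact_mod_cast PySem.Int.floordiv_natCast _ 2]
      have hm : PySem.Int.mod (((x::xs).length : Nat) : Int) 2 = (((x::xs).length % 2 : Nat) : Int) := by
        exact_mod_cast PySem.Int.mod_natCast _ 2
      by_cases hp : (x::xs).length % 2 = 1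
      · rw [dif_pos (show PySem.Int.mod ((((x::xs).length : Nat)) : Int) 2 = 1 by rw [hm, hp]; simp)]
        rw [show ((((x::xs).length : Nat)) : Int) - 1 = ((((x::xs).length - 1 : Nat)) : Int) by
          have h1l : 1 ≤ (x::xs).length := by simp
          push_cast [h1l]; ring]
        rw [PySem.List.slice_natCast]
        simp only [List.length_take, List.length_drop, List.length_cons]
        omega
      · rw [dif_neg (show ¬ PySem.Int.mod ((((x::xs).length : Nat)) : Int) 2 = 1 by
          rw [hm]; intro hc; exact hp (by exact_mod_cast hc))]
        rw [show ((((x::xs).length : Nat)) : Int) - 0 = ((((x::xs).length : Nat)) : Int) by ring]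
        rw [PySem.List.slice_natCast]
        simp only [List.length_take, List.length_drop, List.length_cons]
        simp only [List.length_cons] at hp
        omega

-- ===== PORT B =====
def pvPrefix (coin_list : List Int) : List Int :=
  (coin_list.foldl (fun st c => (st.1 ++ [st.2 + c], st.2 + c)) (([0], 0) : List Int × Int)).1

def pvLoop (pre : List Int) (lo hi : Nat) (start_index end_index : Int) (fuel : Nat) : Option Int :=
  match fuel with
  | 0 => none
  | fuel + 1 =>
    let size := hi - lo
    let right_offset : Nat := if size % 2 = 1 then 1 else 0
    let half := size / 2
    let left_sum := pre.getD (lo + half) 0 - pre.getD lo 0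
    let right_sum := pre.getD (hi - right_offset) 0 - pre.getD (lo + half) 0
    let diff : Int := end_index - start_index + 1
    if left_sum = right_sum then
      if size = 1 then some start_index
      else if size % 2 = 1 then some end_index
      else none
    else if left_sum < right_sum then
      pvLoop pre lo (lo + half) start_index (start_index + PySem.Int.floordiv diff 2 - 1) fuel
    else
      pvLoop pre (lo + half) (hi - right_offset) (start_index + PySem.Int.floordiv diff 2) (end_index - (right_offset : Int)) fuel

def q2_rec_alt (coin_list : List Int) (start_index : Int) (end_index : Int) : Option Int :=
  pvLoop (pvPrefix coin_list) 0 coin_list.length start_index end_index (coin_list.length + 1)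

-- ===== PRECONDITION & SPEC =====
def Spec_q2_rec (coin_list : List Int) (start_index : Int) (end_index : Int) (out : Option Int) : Prop := out = q2_rec_alt coin_list start_index end_index
instance (coin_list : List Int) (start_index : Int) (end_index : Int) (out : Option Int) : Decidable (Spec_q2_rec coin_list start_index end_index out) := by unfold Spec_q2_rec; infer_instance

-- ===== CLAIM (what is proved, stated in full; the proofs are below) =====
def Claim_equal_q2_rec : Prop := ∀ (coin_list : List Int) (start_index : Int) (end_index : Int), Dom_q2_rec coin_list start_index end_index → Spec_q2_rec coin_list start_index end_index (q2_rec coin_list start_index end_index)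

-- ===== LEMMAS AND PROOFS =====

theorem pvFoldFst (l : List Int) (a : List Int) (t : Int) :
    (l.foldl (fun st c => (st.1 ++ [st.2 + c], st.2 + c)) (a, t)).1
      = a ++ (List.range l.length).map (fun i => t + (l.take (i+1)).sum) := by
  induction l generalizing a t with
  | nil => simp
  | cons x l ih =>
      simp only [List.foldl_cons, List.length_cons]
      rw [ih]
      rw [List.range_succ_eq_map]
      simp [List.map_map, Function.comp, add_assoc]

theorem pvPrefix_getD (l : List Int) (i : Nat) (hi : i ≤ l.length) :
    (pvPrefix l).getD i 0 = (l.take i).sum := by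
  unfold pvPrefix
  rw [pvFoldFst]
  cases i with
  | zero => simp
  | succ j =>
      have hj : j < l.length := by omega
      simp only [List.singleton_append, List.getD_cons_succ]
      rw [List.getD_eq_getElem?_getD]
      simp [hj]

theorem pvRangeSum (l : List Int) (lo m : Nat) (h : lo ≤ m) :
    (l.take m).sum - (l.take lo).sum = ((l.drop lo).take (m - lo)).sum := by
  have hm : m = lo + (m - lo) := by omega
  rw [show l.take m = l.take (lo + (m - lo)) from by rw [← hm]]
  rw [List.take_add, List.sum_append]
  ring

theorem pvSumWin (l : List Int) (lo m : Nat) (h1 : lo ≤ m) (h2 : m ≤ l.length) :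
    (pvPrefix l).getD m 0 - (pvPrefix l).getD lo 0 = ((l.drop lo).take (m - lo)).sum := by
  rw [pvPrefix_getD l m h2, pvPrefix_getD l lo (le_trans h1 h2), pvRangeSum l lo m h1]

theorem pvLoop_eq (l : List Int) (fuel : Nat) : ∀ (lo hi : Nat) (s e : Int),
    lo ≤ hi → hi ≤ l.length → hi - lo < fuel →
    pvLoop (pvPrefix l) lo hi s e fuel = q2_rec ((l.drop lo).take (hi - lo)) s e := by
  induction fuel with
  | zero => intro lo hi s e h1 h2 h3; omega
  | succ fuel ih =>
    intro lo hi s e h1 h2 h3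
    have hwlen : ((l.drop lo).take (hi - lo)).length = hi - lo := by
      simp [List.length_take, List.length_drop]; omega
    simp only [pvLoop]
    rw [q2_rec]
    rw [hwlen]
    rw [show PySem.Int.floordiv (((hi - lo : Nat)) : Int) 2 = ((((hi - lo) / 2 : Nat)) : Int) from by
      exact_mod_cast PySem.Int.floordiv_natCast _ 2]
    rw [show PySem.Int.mod (((hi - lo : Nat)) : Int) 2 = ((((hi - lo) % 2 : Nat)) : Int) from by
      exact_mod_cast PySem.Int.mod_natCast _ 2]
    simp only [Nat.cast_eq_one]
    by_cases hp : (hi - lo) % 2 = 1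
    · simp only [if_pos hp, Nat.cast_one]
      have hsz1 : 1 ≤ hi - lo := by omega
      rw [show (((hi - lo : Nat)) : Int) - 1 = (((hi - lo - 1 : Nat)) : Int) from by push_cast [hsz1]; ring]
      rw [PySem.List.slice_zero_start, PySem.List.slice_to_natCast, PySem.List.slice_natCast]
      rw [List.take_take, min_eq_left (by omega : (hi - lo) / 2 ≤ hi - lo)]
      rw [List.drop_take, List.drop_drop]
      rw [List.take_take, min_eq_left (by omega : hi - lo - 1 - (hi - lo) / 2 ≤ hi - lo - (hi - lo) / 2)]
      rw [pvSumWin l lo (lo + (hi - lo) / 2) (by omega) (by omega)]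
      rw [pvSumWin l (lo + (hi - lo) / 2) (hi - 1) (by omega) (by omega)]
      simp only [Nat.add_sub_cancel_left]
      rw [show hi - 1 - (lo + (hi - lo) / 2) = hi - lo - 1 - (hi - lo) / 2 from by omega]
      split_ifs with hne hone hlt
      · rfl
      · rfl
      · have hsz : 2 ≤ hi - lo := by
          rcases Nat.lt_or_ge (hi - lo) 2 with hsm | hsm
          · exfalso
            apply hne
            rw [show hi - lo = 1 from by omega]
            norm_num
          · exact hsm
        rw [ih lo (lo + (hi - lo) / 2) _ _ (by omega) (by omega) (by omega)]
        rw [Nat.add_sub_cancel_left]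
      · have hsz : 2 ≤ hi - lo := by
          rcases Nat.lt_or_ge (hi - lo) 2 with hsm | hsm
          · exfalso
            apply hne
            rw [show hi - lo = 1 from by omega]
            norm_num
          · exact hsm
        rw [ih (lo + (hi - lo) / 2) (hi - 1) _ _ (by omega) (by omega) (by omega)]
        rw [show hi - 1 - (lo + (hi - lo) / 2) = hi - lo - 1 - (hi - lo) / 2 from by omega]
    · simp only [if_neg hp]
      rw [sub_zero, Nat.sub_zero]
      rw [PySem.List.slice_zero_start, PySem.List.slice_to_natCast, PySem.List.slice_natCast]
      rw [List.take_take, min_eq_left (by omega : (hi - lo) / 2 ≤ hi - lo)]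
      rw [List.drop_take, List.drop_drop]
      rw [List.take_take, min_eq_left (le_refl _)]
      rw [pvSumWin l lo (lo + (hi - lo) / 2) (by omega) (by omega)]
      rw [pvSumWin l (lo + (hi - lo) / 2) hi (by omega) h2]
      simp only [Nat.add_sub_cancel_left, Nat.cast_zero, sub_zero]
      rw [show hi - (lo + (hi - lo) / 2) = hi - lo - (hi - lo) / 2 from by omega]
      split_ifs with hne hone hlt
      · rfl
      · rfl
      · have hsz : 2 ≤ hi - lo := by
          rcases Nat.lt_or_ge (hi - lo) 2 with hsm | hsm
          · exfalso
            apply hne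
            rw [show hi - lo = 0 from by omega]
            norm_num
          · exact hsm
        rw [ih lo (lo + (hi - lo) / 2) _ _ (by omega) (by omega) (by omega)]
        rw [Nat.add_sub_cancel_left]
      · have hsz : 2 ≤ hi - lo := by
          rcases Nat.lt_or_ge (hi - lo) 2 with hsm | hsm
          · exfalso
            apply hne
            rw [show hi - lo = 0 from by omega]
            norm_num
          · exact hsm
        rw [ih (lo + (hi - lo) / 2) hi _ _ (by omega) h2 (by omega)]
        rw [show hi - (lo + (hi - lo) / 2) = hi - lo - (hi - lo) / 2 from by omega]


-- ===== VERDICT (by name: the statement is the Claim_ definition above) =====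
theorem q2_rec_spec : Claim_equal_q2_rec := by
  intro l s e _
  unfold Spec_q2_rec q2_rec_alt
  rw [pvLoop_eq l (l.length + 1) 0 l.length s e (Nat.zero_le _) (le_refl _) (by omega)]
  simp
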